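-- pv_equiv track=rewrite | github.com/lavinigam-gcp/build-with-adk | adk-equity-deep-research/app/callbacks/routing.py | _are_similar_companies
-- ===== SOURCE A (Python) =====
-- def _are_similar_companies(name1: str, name2: str) -> bool:
--     """Check if two company names are likely the same.
--
--     Uses simple heuristics to match variations like:
--     - "apple" vs "apple inc"
--     - "alphabet" vs "google"
--     - "meta" vs "facebook"
--     """
--     # Direct containment already handled in caller
--
--     # Common variations
--     variations = {
--         "google": ["alphabet", "googl"],
--         "alphabet": ["google", "googl"],
--         "meta": ["facebook", "fb"],
--         "facebook": ["meta", "fb"],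
--     }
--
--     for key, aliases in variations.items():
--         if key in name1:
--             for alias in aliases:
--                 if alias in name2:
--                     return True
--         if key in name2:
--             for alias in aliases:
--                 if alias in name1:
--                     return True
--
--     return False
-- ===== SOURCE B (Python) =====
-- def _are_similar_companies(name1: str, name2: str) -> bool:
--     """Check if two company names are likely the same.
--
--     Uses simple heuristics to match variations like:
--     - "apple" vs "apple inc"
--     - "alphabet" vs "google"
--     - "meta" vs "facebook"
--     """
--     clusters = [["google", "alphabet", "googl"], ["meta", "facebook", "fb"]]
--     for cluster in clusters:
--         hits1 = {t for t in cluster if t in name1}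
--         hits2 = {t for t in cluster if t in name2}
--         # a match needs two DISTINCT tokens of one cluster split across the names
--         if hits1 and hits2 and len(hits1 | hits2) >= 2:
--             return True
--     return False
-- ===== Notes on version B (the rewrite author's own statement) =====
-- stated objective: alternative
-- what changed: Instead of scanning A's alias table for a key/alias pair split across the names, B tokenizes each name into its set of cluster tokens and declares a match when one cluster contributes two distinct tokens across the two hit sets (both nonempty, union of size >= 2).
import Mathlib
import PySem

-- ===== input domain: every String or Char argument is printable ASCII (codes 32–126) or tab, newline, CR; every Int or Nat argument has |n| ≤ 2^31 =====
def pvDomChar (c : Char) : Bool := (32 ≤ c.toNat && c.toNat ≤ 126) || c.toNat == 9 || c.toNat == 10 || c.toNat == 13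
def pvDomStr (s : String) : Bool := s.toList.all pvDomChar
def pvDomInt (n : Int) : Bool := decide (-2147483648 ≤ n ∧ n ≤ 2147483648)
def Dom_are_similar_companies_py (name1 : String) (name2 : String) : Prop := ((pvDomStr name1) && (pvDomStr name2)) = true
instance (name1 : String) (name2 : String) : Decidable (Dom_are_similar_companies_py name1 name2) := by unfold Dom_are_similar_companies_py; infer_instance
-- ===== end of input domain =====

-- B replaces A's alias-table scan by tokenizing each name into its set of cluster tokens and
-- testing whether one cluster contributes two distinct tokens across the two hit sets (objective: alternative).

-- ===== PORT A =====
-- the 'variations' dict, as an insertion-ordered association list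
def pvVariationsA : List (String × List String) :=
  [("google", ["alphabet", "googl"]),
   ("alphabet", ["google", "googl"]),
   ("meta", ["facebook", "fb"]),
   ("facebook", ["meta", "fb"])]

-- 'for key, aliases in variations.items(): …' with the two inner alias loops and early return
def pvLoopA (name1 name2 : String) : List (String × List String) → Bool
  | [] => false
  | (key, aliases) :: rest =>
    if PySem.Str.isIn key name1 && aliases.any (fun al => PySem.Str.isIn al name2) then
      true
    else if PySem.Str.isIn key name2 && aliases.any (fun al => PySem.Str.isIn al name1) then
      true
    else
      pvLoopA name1 name2 rest

def are_similar_companies_py (name1 : String) (name2 : String) : Bool :=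
  pvLoopA name1 name2 pvVariationsA

-- ===== PORT B =====
def pvClustersB : List (List String) :=
  [["google", "alphabet", "googl"], ["meta", "facebook", "fb"]]

-- body of 'for cluster in clusters:': the two hit sets and the match test
def pvClusterHit (name1 name2 : String) (cluster : List String) : Bool :=
  let hits1 : PySem.Set String := PySem.Set.ofList (cluster.filter (fun t => PySem.Str.isIn t name1))
  let hits2 : PySem.Set String := PySem.Set.ofList (cluster.filter (fun t => PySem.Str.isIn t name2))
  !hits1.isEmpty && !hits2.isEmpty && decide (2 ≤ PySem.Set.len (PySem.Set.union hits1 hits2))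

-- the loop itself, with its early return
def pvLoopB (name1 name2 : String) : List (List String) → Bool
  | [] => false
  | cluster :: rest =>
    if pvClusterHit name1 name2 cluster then true
    else pvLoopB name1 name2 rest

def are_similar_companies_py_alt (name1 : String) (name2 : String) : Bool :=
  pvLoopB name1 name2 pvClustersB

-- ===== PRECONDITION & SPEC =====
def Spec_are_similar_companies_py (name1 : String) (name2 : String) (out : Bool) : Prop := out = are_similar_companies_py_alt name1 name2
instance (name1 : String) (name2 : String) (out : Bool) : Decidable (Spec_are_similar_companies_py name1 name2 out) := by unfold Spec_are_similar_companies_py; infer_instance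

-- ===== CLAIM (what is proved, stated in full; the proofs are below) =====
def Claim_equal_are_similar_companies_py : Prop := ∀ (name1 : String) (name2 : String), Dom_are_similar_companies_py name1 name2 → Spec_are_similar_companies_py name1 name2 (are_similar_companies_py name1 name2)

-- ===== LEMMAS AND PROOFS =====
-- Characterize B's per-cluster hit-set test as a Boolean combination of the six substring atoms.
theorem pvHitG (name1 name2 : String) :
    pvClusterHit name1 name2 ["google", "alphabet", "googl"] =
      ((PySem.Str.isIn "google" name1 && PySem.Str.isIn "alphabet" name2 ||
        PySem.Str.isIn "google" name2 && PySem.Str.isIn "alphabet" name1) ||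
       (PySem.Str.isIn "google" name1 && PySem.Str.isIn "googl" name2 ||
        PySem.Str.isIn "google" name2 && PySem.Str.isIn "googl" name1) ||
       (PySem.Str.isIn "alphabet" name1 && PySem.Str.isIn "googl" name2 ||
        PySem.Str.isIn "alphabet" name2 && PySem.Str.isIn "googl" name1)) := by
  rcases Bool.eq_false_or_eq_true (PySem.Str.isIn "google" name1) with h1|h1 <;>
  rcases Bool.eq_false_or_eq_true (PySem.Str.isIn "alphabet" name1) with h2|h2 <;>
  rcases Bool.eq_false_or_eq_true (PySem.Str.isIn "googl" name1) with h3|h3 <;>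
  rcases Bool.eq_false_or_eq_true (PySem.Str.isIn "google" name2) with h4|h4 <;>
  rcases Bool.eq_false_or_eq_true (PySem.Str.isIn "alphabet" name2) with h5|h5 <;>
  rcases Bool.eq_false_or_eq_true (PySem.Str.isIn "googl" name2) with h6|h6 <;>
  simp only [pvClusterHit, List.filter_cons, List.filter_nil, h1, h2, h3, h4, h5, h6] <;> decide

theorem pvHitM (name1 name2 : String) :
    pvClusterHit name1 name2 ["meta", "facebook", "fb"] =
      ((PySem.Str.isIn "meta" name1 && PySem.Str.isIn "facebook" name2 ||
        PySem.Str.isIn "meta" name2 && PySem.Str.isIn "facebook" name1) ||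
       (PySem.Str.isIn "meta" name1 && PySem.Str.isIn "fb" name2 ||
        PySem.Str.isIn "meta" name2 && PySem.Str.isIn "fb" name1) ||
       (PySem.Str.isIn "facebook" name1 && PySem.Str.isIn "fb" name2 ||
        PySem.Str.isIn "facebook" name2 && PySem.Str.isIn "fb" name1)) := by
  rcases Bool.eq_false_or_eq_true (PySem.Str.isIn "meta" name1) with h1|h1 <;>
  rcases Bool.eq_false_or_eq_true (PySem.Str.isIn "facebook" name1) with h2|h2 <;>
  rcases Bool.eq_false_or_eq_true (PySem.Str.isIn "fb" name1) with h3|h3 <;>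
  rcases Bool.eq_false_or_eq_true (PySem.Str.isIn "meta" name2) with h4|h4 <;>
  rcases Bool.eq_false_or_eq_true (PySem.Str.isIn "facebook" name2) with h5|h5 <;>
  rcases Bool.eq_false_or_eq_true (PySem.Str.isIn "fb" name2) with h6|h6 <;>
  simp only [pvClusterHit, List.filter_cons, List.filter_nil, h1, h2, h3, h4, h5, h6] <;> decide

-- The remaining equality of two pure Boolean formulas over the twelve atoms.
theorem pvBoolTable (g1 a1 gl1 m1 f1 b1 g2 a2 gl2 m2 f2 b2 : Bool) :
    (if (g1 && (a2 || gl2)) = true then true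
     else if (g2 && (a1 || gl1)) = true then true
     else if (a1 && (g2 || gl2)) = true then true
     else if (a2 && (g1 || gl1)) = true then true
     else if (m1 && (f2 || b2)) = true then true
     else if (m2 && (f1 || b1)) = true then true
     else if (f1 && (m2 || b2)) = true then true
     else if (f2 && (m1 || b1)) = true then true
     else false)
    = (if ((g1 && a2 || g2 && a1) || (g1 && gl2 || g2 && gl1) || (a1 && gl2 || a2 && gl1)) = true
       then true
       else if ((m1 && f2 || m2 && f1) || (m1 && b2 || m2 && b1) || (f1 && b2 || f2 && b1)) = true
       then true
       else false) := by
  revert g1 a1 gl1 m1 f1 b1 g2 a2 gl2 m2 f2 b2; decide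

-- ===== VERDICT (by name: the statement is the Claim_ definition above) =====
theorem are_similar_companies_py_spec : Claim_equal_are_similar_companies_py := by
  intro name1 name2 _
  unfold Spec_are_similar_companies_py are_similar_companies_py are_similar_companies_py_alt
  simp only [pvVariationsA, pvClustersB, pvLoopA, pvLoopB, List.any_cons, List.any_nil,
    Bool.or_false, pvHitG, pvHitM]
  exact pvBoolTable _ _ _ _ _ _ _ _ _ _ _ _
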